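-- pv_equiv track=rewrite | github.com/marhoy/googleCodeJam | 2017/Qualification_B_Tidy_Numbers.py | replace_by_zeros
-- ===== SOURCE A (Python) =====
-- def replace_by_zeros(string):
--     l = list(string)
--     lowest = l[0]
--     for i in range(1, len(l)):
--         if l[i] < lowest:
--             lowest = l[i]
--             for j in range(i, len(l)):
--                 if l[j] > lowest:
--                     l[j] = '0'
--     return ''.join(l)
-- ===== SOURCE B (Python) =====
-- def replace_by_zeros(string):
--     chars = list(string)
--     m = chars[0]
--     out = [m]
--     active = False
--     for c in chars[1:]:
--         if c < m:
--             m = c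
--             active = True
--             out.append(c)
--         elif active and c > m:
--             out.append('0')
--             if m > '0':
--                 m = '0'
--         else:
--             out.append(c)
--     return ''.join(out)
-- ===== Notes on version B (the rewrite author's own statement) =====
-- stated objective: alternative
-- what changed: A rescans and zeroes the whole remaining suffix every time the running minimum drops; B makes a single left-to-right pass that decides each character once, keeping only the running minimum and a flag saying whether zeroing has started.
import Mathlib
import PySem

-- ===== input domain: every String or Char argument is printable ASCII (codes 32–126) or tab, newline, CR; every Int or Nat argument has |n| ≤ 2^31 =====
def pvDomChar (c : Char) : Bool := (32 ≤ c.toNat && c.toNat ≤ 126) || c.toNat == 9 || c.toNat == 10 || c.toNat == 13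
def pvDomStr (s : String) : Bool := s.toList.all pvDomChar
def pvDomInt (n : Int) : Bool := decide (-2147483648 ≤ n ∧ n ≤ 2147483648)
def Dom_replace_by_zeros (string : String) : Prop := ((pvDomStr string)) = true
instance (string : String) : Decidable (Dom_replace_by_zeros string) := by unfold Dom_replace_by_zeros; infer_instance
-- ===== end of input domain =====

-- B replaces A's "rescan and zero the whole suffix after every drop of the running minimum"
-- by a single left-to-right pass that decides each character once, keeping only the running
-- minimum and a 'zeroing started' flag (objective: alternative single-pass decomposition).

-- ===== PORT A =====
-- inner loop: 'for j in range(i, len(l)): if l[j] > lowest: l[j] = "0"'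
def pvZeroSuffix (l : List Char) (i : Int) (lowest : Char) : List Char :=
  (PySem.List.pyRange i (l.length : Int) 1).foldl
    (fun l' j => if lowest < PySem.List.pyGetD l' j ' ' then PySem.List.pySetD l' j '0' else l') l

-- one iteration of the outer loop; indices produced by range are in bounds, so pyGetD/pySetD are exact
def pvOuterStep (st : List Char × Char) (i : Int) : List Char × Char :=
  if PySem.List.pyGetD st.1 i ' ' < st.2 then
    (pvZeroSuffix st.1 i (PySem.List.pyGetD st.1 i ' '), PySem.List.pyGetD st.1 i ' ')
  else st

def replace_by_zeros (string : String) : String :=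
  let l := string.toList
  let lowest := PySem.List.pyGetD l 0 ' '   -- l[0]; "" (IndexError) is excluded by Pre_
  String.mk ((PySem.List.pyRange 1 (l.length : Int) 1).foldl pvOuterStep (l, lowest)).1

-- ===== PORT B =====
-- state (out, m, active); one loop step of Source B
def pvAltStep (st : List Char × Char × Bool) (c : Char) : List Char × Char × Bool :=
  if c < st.2.1 then (st.1 ++ [c], c, true)
  else if st.2.2 && decide (st.2.1 < c) then
    (st.1 ++ ['0'], (if '0' < st.2.1 then '0' else st.2.1), st.2.2)
  else (st.1 ++ [c], st.2.1, st.2.2)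

def replace_by_zeros_alt (string : String) : String :=
  let chars := string.toList
  let m := PySem.List.pyGetD chars 0 ' '   -- chars[0]; "" (IndexError) is excluded by Pre_
  String.mk ((chars.drop 1).foldl pvAltStep ([m], m, false)).1   -- chars[1:]

-- ===== PRECONDITION & SPEC =====
-- Pre_ excludes only the empty string, on which both Pythons raise IndexError at l[0].
def Pre_replace_by_zeros (string : String) : Prop := string ≠ ""
instance (string : String) : Decidable (Pre_replace_by_zeros string) := by
  unfold Pre_replace_by_zeros; infer_instance
def pvWitness_replace_by_zeros : String := "20175"

def Spec_replace_by_zeros (string : String) (out : String) : Prop := out = replace_by_zeros_alt string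
instance (string : String) (out : String) : Decidable (Spec_replace_by_zeros string out) := by unfold Spec_replace_by_zeros; infer_instance

-- ===== CLAIM (what is proved, stated in full; the proofs are below) =====
def Claim_equal_replace_by_zeros : Prop := ∀ (string : String), Dom_replace_by_zeros string → Pre_replace_by_zeros string → Spec_replace_by_zeros string (replace_by_zeros string)

-- ===== LEMMAS AND PROOFS =====

-- the value A's list holds at a suffix position when the running minimum is m and zeroing is active
def pvPhi (m : Char) (active : Bool) (x : Char) : Char :=
  if active && decide (m < x) then '0' else x

-- B's decisions, written as a recursion on the remaining original characters
def pvGoB (m : Char) (active : Bool) : List Char → List Char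
  | [] => []
  | c :: rest =>
    if c < m then c :: pvGoB c true rest
    else if active && decide (m < c) then
      '0' :: pvGoB (if '0' < m then '0' else m) active rest
    else c :: pvGoB m active rest

theorem pvAlt_out (s acc : List Char) (m : Char) (active : Bool) :
    (s.foldl pvAltStep (acc, m, active)).1 = acc ++ pvGoB m active s := by
  induction s generalizing acc m active with
  | nil => simp [pvGoB]
  | cons c rest ih =>
    simp only [List.foldl_cons, pvAltStep, pvGoB]
    split_ifs <;> simp [ih, List.append_assoc]

theorem pvInner_eq (n : Nat) (M : Char) : ∀ (l : List Char) (j : Nat), j + n = l.length →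
    (PySem.List.pyRange (j : Int) (l.length : Int) 1).foldl
      (fun l' j' => if M < PySem.List.pyGetD l' j' ' ' then PySem.List.pySetD l' j' '0' else l') l
    = l.take j ++ (l.drop j).map (fun x => if M < x then '0' else x) := by
  induction n with
  | zero =>
    intro l j hj
    rw [show PySem.List.pyRange (j : Int) (l.length : Int) 1 = [] from
          PySem.List.pyRange_one_eq_nil (by omega)]
    rw [List.take_of_length_le (by omega), List.drop_of_length_le (by omega)]
    simp
  | succ n ih =>
    intro l j hj
    have hjl : j < l.length := by omega
    rw [PySem.List.pyRange_one_cons (by exact_mod_cast hjl)]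
    simp only [List.foldl_cons, PySem.List.pyGetD_natCast, PySem.List.pySetD_natCast]
    have hgetD : l.getD j ' ' = l[j] := List.getD_eq_getElem l ' ' hjl
    rw [List.drop_eq_getElem_cons hjl, List.map_cons]
    by_cases hc : M < l[j]
    · rw [if_pos (by rw [hgetD]; exact hc)]
      have hlen : j + 1 + n = (l.set j '0').length := by simp; omega
      have := ih (l.set j '0') (j + 1) hlen
      rw [show ((j : Int) + 1) = ((j + 1 : Nat) : Int) by push_cast; ring,
          show ((l.length : Int)) = (((l.set j '0').length : Int)) by simp] at *
      rw [this]
      rw [List.take_succ_eq_append_getElem (by simpa using hjl), List.take_set,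
          List.getElem_set_self (by simpa using hjl), List.drop_set]
      have : (l.take j).set j '0' = l.take j := by
        apply List.set_eq_of_length_le; simp
      rw [this]
      simp [hc, List.append_assoc]
    · rw [if_neg (by rw [hgetD]; exact hc)]
      rw [show ((j : Int) + 1) = ((j + 1 : Nat) : Int) by push_cast; ring]
      rw [ih l (j + 1) (by omega), List.take_succ_eq_append_getElem hjl]
      simp only [if_neg hc, List.append_assoc, List.singleton_append]

-- pointwise composition facts: rescanning a phi-suffix with a new minimum is again a phi-suffix
theorem pvPhi_comp_keep (M c : Char) (active : Bool) (h2 : c < M)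
    (x : Char) : (if c < pvPhi M active x then '0' else pvPhi M active x) = pvPhi c true x := by
  unfold pvPhi
  cases active with
  | false => simp
  | true =>
    by_cases hx : M < x
    · have hcx : c < x := lt_trans h2 hx
      simp only [hx, decide_true, Bool.and_self, if_true]
      by_cases h0 : c < '0' <;> simp [h0, hcx]
    · simp [hx]

theorem pvPhi_comp_zero (M : Char) (h2 : '0' < M)
    (x : Char) : (if '0' < pvPhi M true x then '0' else pvPhi M true x) = pvPhi '0' true x := by
  unfold pvPhi
  by_cases hx : M < x
  · have h0x : '0' < x := lt_trans h2 hx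
    simp [hx, h0x]
  · simp [hx]

theorem pvOuter_eq : ∀ (s p : List Char) (M : Char) (active : Bool),
    ((PySem.List.pyRange (p.length : Int) ((p ++ s.map (pvPhi M active)).length : Int) 1).foldl
        pvOuterStep (p ++ s.map (pvPhi M active), M)).1
      = p ++ pvGoB M active s := by
  intro s
  induction s with
  | nil =>
    intro p M active
    simp [PySem.List.pyRange_one_eq_nil, pvGoB]
  | cons c s' ih =>
    intro p M active
    -- normalize the range endpoint once and for all
    have hL : ((p ++ (c :: s').map (pvPhi M active)).length : Int)
        = (p.length : Int) + 1 + (s'.length : Int) := by simp; omega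
    rw [hL, PySem.List.pyRange_one_cons (by omega)]
    simp only [List.foldl_cons]
    -- the two shapes of the stored character at position p.length
    by_cases hb : active = true ∧ M < c
    · -- this position was already zeroed by an earlier rescan: the list holds '0'
      have hval : pvPhi M active c = '0' := by simp [pvPhi, hb.1, hb.2]
      have hmap : (c :: s').map (pvPhi M active) = '0' :: s'.map (pvPhi M active) := by
        simp [hval]
      rw [hmap]
      have hget : PySem.List.pyGetD (p ++ '0' :: s'.map (pvPhi M active)) (p.length : Int) ' '
          = '0' := by
        rw [PySem.List.pyGetD_natCast]
        simp [List.getD]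
      by_cases hvM : '0' < M
      · -- A sees '0' < lowest: drops lowest to '0' and rescans
        rw [show pvOuterStep (p ++ '0' :: s'.map (pvPhi M active), M) (p.length : Int)
              = (pvZeroSuffix (p ++ '0' :: s'.map (pvPhi M active)) (p.length : Int) '0', '0') by
          unfold pvOuterStep; rw [hget]; simp [hvM]]
        unfold pvZeroSuffix
        have hinner := pvInner_eq (1 + s'.length) '0' (p ++ '0' :: s'.map (pvPhi M active))
          p.length (by simp; omega)
        rw [hinner, List.take_append_of_le_length (le_refl _), List.take_length,
            List.drop_append_of_le_length (le_refl _)]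
        simp only [List.drop_length, List.nil_append, List.map_cons, List.map_map]
        rw [show (if ('0':Char) < '0' then '0' else '0') = '0' by simp]
        have hcomp : ((fun x => if '0' < x then '0' else x) ∘ pvPhi M active)
            = pvPhi '0' true := by
          funext x
          simp only [Function.comp_apply]
          rw [hb.1]
          exact pvPhi_comp_zero M hvM x
        rw [hcomp]
        have key := ih (p ++ ['0']) '0' true
        rw [show (((p ++ ['0']) : List Char).length : Int) = (p.length : Int) + 1 by
              simp,
            show (((p ++ ['0']) ++ s'.map (pvPhi '0' true)).length : Int)
              = (p.length : Int) + 1 + (s'.length : Int) by simp; omega,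
            List.append_assoc] at key
        simp only [List.singleton_append] at key
        rw [key]
        have hgo : pvGoB M active (c :: s') = '0' :: pvGoB '0' active s' := by
          simp only [pvGoB]
          rw [if_neg (by exact fun h => absurd (lt_trans h hb.2) (lt_irrefl _)),
              if_pos (by simp [hb.1, hb.2]), if_pos hvM]
        rw [hgo, hb.1]
        simp
      · -- '0' is not below lowest: A keeps its state
        rw [show pvOuterStep (p ++ '0' :: s'.map (pvPhi M active), M) (p.length : Int)
              = (p ++ '0' :: s'.map (pvPhi M active), M) by
          unfold pvOuterStep; rw [hget]; simp [hvM]]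
        have key := ih (p ++ ['0']) M active
        rw [show (((p ++ ['0']) : List Char).length : Int) = (p.length : Int) + 1 by
              simp,
            show (((p ++ ['0']) ++ s'.map (pvPhi M active)).length : Int)
              = (p.length : Int) + 1 + (s'.length : Int) by simp; omega,
            List.append_assoc] at key
        simp only [List.singleton_append] at key
        rw [key]
        have hgo : pvGoB M active (c :: s') = '0' :: pvGoB M active s' := by
          simp only [pvGoB]
          rw [if_neg (by exact fun h => absurd (lt_trans h hb.2) (lt_irrefl _)),
              if_pos (by simp [hb.1, hb.2]), if_neg hvM]
        rw [hgo]
        simp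
    · -- this position still holds the original character c
      have hcond : (active && decide (M < c)) = false := by
        cases active with
        | false => simp
        | true => simp only [Bool.true_and, decide_eq_false_iff_not]
                  exact fun h => hb ⟨rfl, h⟩
      have hval : pvPhi M active c = c := by simp [pvPhi, hcond]
      have hmap : (c :: s').map (pvPhi M active) = c :: s'.map (pvPhi M active) := by
        simp [hval]
      rw [hmap]
      have hget : PySem.List.pyGetD (p ++ c :: s'.map (pvPhi M active)) (p.length : Int) ' '
          = c := by
        rw [PySem.List.pyGetD_natCast]
        simp [List.getD]
      by_cases hvM : c < M
      · -- a genuine strict decrease: A rescans with lowest = c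
        rw [show pvOuterStep (p ++ c :: s'.map (pvPhi M active), M) (p.length : Int)
              = (pvZeroSuffix (p ++ c :: s'.map (pvPhi M active)) (p.length : Int) c, c) by
          unfold pvOuterStep; rw [hget]; simp [hvM]]
        unfold pvZeroSuffix
        have hinner := pvInner_eq (1 + s'.length) c (p ++ c :: s'.map (pvPhi M active))
          p.length (by simp; omega)
        rw [hinner, List.take_append_of_le_length (le_refl _), List.take_length,
            List.drop_append_of_le_length (le_refl _)]
        simp only [List.drop_length, List.nil_append, List.map_cons, List.map_map]
        rw [show (if c < c then '0' else c) = c by simp]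
        have hcomp : ((fun x => if c < x then '0' else x) ∘ pvPhi M active)
            = pvPhi c true := by
          funext x
          simp only [Function.comp_apply]
          exact pvPhi_comp_keep M c active hvM x
        rw [hcomp]
        have key := ih (p ++ [c]) c true
        rw [show (((p ++ [c]) : List Char).length : Int) = (p.length : Int) + 1 by
              simp,
            show (((p ++ [c]) ++ s'.map (pvPhi c true)).length : Int)
              = (p.length : Int) + 1 + (s'.length : Int) by simp; omega,
            List.append_assoc] at key
        simp only [List.singleton_append] at key
        rw [key]
        have hgo : pvGoB M active (c :: s') = c :: pvGoB c true s' := by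
          simp only [pvGoB]
          rw [if_pos hvM]
        rw [hgo]
        simp
      · -- no decrease, nothing zeroed: A keeps its state
        rw [show pvOuterStep (p ++ c :: s'.map (pvPhi M active), M) (p.length : Int)
              = (p ++ c :: s'.map (pvPhi M active), M) by
          unfold pvOuterStep; rw [hget]; simp [hvM]]
        have key := ih (p ++ [c]) M active
        rw [show (((p ++ [c]) : List Char).length : Int) = (p.length : Int) + 1 by
              simp,
            show (((p ++ [c]) ++ s'.map (pvPhi M active)).length : Int)
              = (p.length : Int) + 1 + (s'.length : Int) by simp; omega,
            List.append_assoc] at key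
        simp only [List.singleton_append] at key
        rw [key]
        have hgo : pvGoB M active (c :: s') = c :: pvGoB M active s' := by
          simp only [pvGoB]
          rw [if_neg hvM, if_neg (by simp [hcond])]
        rw [hgo]
        simp [List.append_assoc]

theorem pvPhi_false (t : List Char) (M : Char) : t.map (pvPhi M false) = t := by
  have hid : pvPhi M false = id := by funext x; simp [pvPhi]
  rw [hid, List.map_id]

-- ===== VERDICT (by name: the statement is the Claim_ definition above) =====
theorem replace_by_zeros_spec : Claim_equal_replace_by_zeros := by
  intro string _ hpre
  unfold Spec_replace_by_zeros replace_by_zeros replace_by_zeros_alt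
  have hnil : string.toList ≠ [] := fun h => hpre (String.toList_eq_nil_iff.mp h)
  obtain ⟨h, t, hl⟩ := List.exists_cons_of_ne_nil hnil
  simp only [hl]
  have hget0 : PySem.List.pyGetD (h :: t) (0 : Int) ' ' = h := by
    simp [PySem.List.pyGetD_zero_cons]
  rw [hget0]
  have houter := pvOuter_eq t [h] h false
  rw [pvPhi_false,
      show (([h] : List Char).length : Int) = 1 by simp,
      show ((([h] : List Char) ++ t).length : Int) = (((h :: t).length : Nat) : Int) by simp]
      at houter
  simp only [List.singleton_append] at houter
  rw [houter, List.drop_one, List.tail_cons, pvAlt_out]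
  rfl
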